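-- pv_equiv track=rewrite | github.com/Iknownothing-Yu/Selenuim_project | Exercise/LeetCode/Hashtable/Hashtable_1189.py | count_balloon
-- ===== SOURCE A (Python) =====
-- from collections import defaultdict
--
-- def count_balloon(arr):
--     balloon = 'balloon'
--     ba_dict = defaultdict(int)
--
--     for letter in balloon:
--         if letter == 'l' or letter == 'o':
--             ba_dict[letter] = arr.count(letter)//2
--         else:
--             ba_dict[letter] = arr.count(letter)
--
--     return min(ba_dict.values())
-- ===== SOURCE B (Python) =====
-- def count_balloon(arr):
--     b = a = l = o = n = 0
--     for ch in arr:
--         if ch == 'b':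
--             b += 1
--         elif ch == 'a':
--             a += 1
--         elif ch == 'l':
--             l += 1
--         elif ch == 'o':
--             o += 1
--         elif ch == 'n':
--             n += 1
--     return min(b, a, l // 2, o // 2, n)
-- ===== Notes on version B (the rewrite author's own statement) =====
-- stated objective: alternative
-- what changed: Single explicit pass over arr maintaining five integer accumulators (one per needed letter) updated by an if/elif chain, then min(b, a, l//2, o//2, n), instead of A's seven full arr.count() scans stored into a defaultdict whose values are min'd.
import Mathlib
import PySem

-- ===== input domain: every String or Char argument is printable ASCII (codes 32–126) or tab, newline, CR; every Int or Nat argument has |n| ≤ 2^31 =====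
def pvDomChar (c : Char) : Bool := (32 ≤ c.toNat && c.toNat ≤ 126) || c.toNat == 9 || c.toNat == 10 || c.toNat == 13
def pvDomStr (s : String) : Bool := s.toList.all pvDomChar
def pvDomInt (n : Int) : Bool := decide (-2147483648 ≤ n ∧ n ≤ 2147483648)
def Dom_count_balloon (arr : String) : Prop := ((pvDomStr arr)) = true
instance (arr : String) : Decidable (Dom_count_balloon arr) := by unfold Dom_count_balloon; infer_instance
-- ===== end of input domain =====

-- B replaces A's seven full arr.count() scans into a defaultdict by ONE explicit pass over
-- arr maintaining five integer accumulators, then min(b, a, l//2, o//2, n) (objective: alternative).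

-- ===== PORT A =====
-- loop 'for letter in balloon' over the literal string, defaultdict(int) as PySem.Dict,
-- arr.count(letter) as PySem.Str.count, '//2' as PySem.Int.floordiv;
-- min(ba_dict.values()) via PySem.List.min? — the dict always holds the 5 distinct letters
-- of 'balloon', so the list is never empty and .getD 0 is never the default.
def count_balloon (arr : String) : Int :=
  let balloon : List Char := "balloon".toList
  let ba_dict : PySem.Dict Char Int :=
    balloon.foldl (fun d letter =>
      if letter == 'l' || letter == 'o' then
        d.insert letter (PySem.Int.floordiv (PySem.Str.count arr (String.ofList [letter]) : Int) 2)
      else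
        d.insert letter (PySem.Str.count arr (String.ofList [letter]) : Int))
      PySem.Dict.empty
  (PySem.List.min? ba_dict.values (fun x => x)).getD 0

-- ===== PORT B =====
-- the for-loop with five accumulators is a foldl over arr.toList with a 5-tuple state;
-- the if/elif chain is the nested ite; Python's 5-argument min is the left-nested min chain.
def count_balloon_step (s : Int × Int × Int × Int × Int) (ch : Char) :
    Int × Int × Int × Int × Int :=
  if ch == 'b' then (s.1 + 1, s.2.1, s.2.2.1, s.2.2.2.1, s.2.2.2.2)
  else if ch == 'a' then (s.1, s.2.1 + 1, s.2.2.1, s.2.2.2.1, s.2.2.2.2)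
  else if ch == 'l' then (s.1, s.2.1, s.2.2.1 + 1, s.2.2.2.1, s.2.2.2.2)
  else if ch == 'o' then (s.1, s.2.1, s.2.2.1, s.2.2.2.1 + 1, s.2.2.2.2)
  else if ch == 'n' then (s.1, s.2.1, s.2.2.1, s.2.2.2.1, s.2.2.2.2 + 1)
  else s

def count_balloon_alt (arr : String) : Int :=
  let s := arr.toList.foldl count_balloon_step (0, 0, 0, 0, 0)
  min (min (min (min s.1 s.2.1) (PySem.Int.floordiv s.2.2.1 2))
      (PySem.Int.floordiv s.2.2.2.1 2)) s.2.2.2.2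

-- ===== PRECONDITION & SPEC =====
def Spec_count_balloon (arr : String) (out : Int) : Prop := out = count_balloon_alt arr
instance (arr : String) (out : Int) : Decidable (Spec_count_balloon arr out) := by unfold Spec_count_balloon; infer_instance

-- ===== CLAIM (what is proved, stated in full; the proofs are below) =====
def Claim_equal_count_balloon : Prop := ∀ (arr : String), Dom_count_balloon arr → Spec_count_balloon arr (count_balloon arr)

-- ===== LEMMAS AND PROOFS =====
-- s.count(c) for a single character equals List.count of that character.
theorem count_go_singleton (c : Char) (l : List Char) (fuel : Nat) (acc : Nat)
    (h : l.length ≤ fuel) : PySem.Chars.count.go [c] fuel l acc = acc + l.count c := by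
  induction l generalizing fuel acc with
  | nil => cases fuel <;> simp [PySem.Chars.count.go]
  | cons x t ih =>
    cases fuel with
    | zero => simp at h
    | succ f =>
      simp only [List.length_cons, Nat.succ_le_succ_iff] at h
      rw [PySem.Chars.count.go]
      by_cases hx : x = c
      · simp [hx, List.isPrefixOf, ih _ _ h]; omega
      · simp [List.isPrefixOf, hx, ih _ _ h, Ne.symm hx]

theorem count_singleton (l : List Char) (c : Char) :
    PySem.Chars.count l [c] = l.count c := by
  simp [PySem.Chars.count]
  rw [count_go_singleton c l l.length 0 le_rfl]
  omega

-- B's accumulator loop computes the five letter counts.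
theorem foldl_step_counts (l : List Char) (s : Int × Int × Int × Int × Int) :
    l.foldl count_balloon_step s =
      (s.1 + l.count 'b', s.2.1 + l.count 'a', s.2.2.1 + l.count 'l',
       s.2.2.2.1 + l.count 'o', s.2.2.2.2 + l.count 'n') := by
  induction l generalizing s with
  | nil => simp
  | cons x t ih =>
    simp only [List.foldl_cons, ih, count_balloon_step, List.count_cons]
    by_cases hb : x = 'b' <;> by_cases ha : x = 'a' <;> by_cases hl : x = 'l' <;>
      by_cases ho : x = 'o' <;> by_cases hn : x = 'n' <;>
      simp_all <;> omega

-- ===== VERDICT (by name: the statement is the Claim_ definition above) =====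
theorem count_balloon_spec : Claim_equal_count_balloon := by
  intro arr _
  unfold Spec_count_balloon
  have hb : "balloon".toList = ['b','a','l','l','o','o','n'] := rfl
  simp [count_balloon, count_balloon_alt, count_singleton, hb, List.foldl,
    PySem.Dict.insert, PySem.Dict.empty, PySem.Dict.contains, PySem.Dict.values,
    foldl_step_counts]
  rw [PySem.List.min?_id_cons]
  simp [List.foldl, min_assoc]
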